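-- pv_equiv track=rewrite | github.com/amitsng7/Leetcode | Binary Matrix.py | modifyMatrix
-- ===== SOURCE A (Python) =====
-- def modifyMatrix(m,n,a):
--     row=[0]*m
--     col=[0]*n
--     for i in range(m):
--         for j in range(n):
--             if(a[i][j]==1):
--                 row[i]=1
--                 col[j]=1
--     for i in range(m):
--         for j in range(n):
--             if(row[i] ==1 or col[j]==1):
--                 a[i][j]=1
--     return a
-- ===== SOURCE B (Python) =====
-- def modifyMatrix(m, n, a):
--     # one scan to record which rows/columns contain a 1, then write only those
--     rows = set()
--     cols = set()
--     for i in range(m):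
--         for j in range(n):
--             if a[i][j] == 1:
--                 rows.add(i)
--                 cols.add(j)
--     for i in rows:
--         a[i][:n] = [1] * n
--     for j in cols:
--         for i in range(m):
--             a[i][j] = 1
--     return a
-- ===== Notes on version B (the rewrite author's own statement) =====
-- stated objective: alternative
-- what changed: The second pass no longer tests every cell against the flag arrays: one scan collects the row/column indices containing a 1 into two sets, then B overwrites only the flagged rows (whole-row slice assignment) and flagged columns directly, writing instead of testing per cell.
import Mathlib
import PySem

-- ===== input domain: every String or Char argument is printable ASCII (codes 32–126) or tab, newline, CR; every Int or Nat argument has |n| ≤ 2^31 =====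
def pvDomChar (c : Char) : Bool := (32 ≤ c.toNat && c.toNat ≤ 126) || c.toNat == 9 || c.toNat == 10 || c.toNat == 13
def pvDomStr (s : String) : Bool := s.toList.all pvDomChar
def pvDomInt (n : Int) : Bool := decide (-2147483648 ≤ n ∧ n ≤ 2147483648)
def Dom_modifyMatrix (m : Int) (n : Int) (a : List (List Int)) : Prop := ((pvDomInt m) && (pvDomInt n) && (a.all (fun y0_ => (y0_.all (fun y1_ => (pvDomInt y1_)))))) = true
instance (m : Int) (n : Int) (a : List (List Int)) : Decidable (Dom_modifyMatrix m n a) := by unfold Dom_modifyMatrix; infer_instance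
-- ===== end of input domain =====

-- B replaces A's cell-by-cell conditional second scan by precomputed row/column index sets
-- followed by direct overwrites of only the flagged rows/columns (alternative decomposition).
-- Both A and B mutate `a` in place in Python; the equivalence proved here is about the return value.

-- ===== PORT A =====
def modifyMatrix (m : Int) (n : Int) (a : List (List Int)) : List (List Int) :=
  let row : List Int := List.replicate m.toNat 0        -- row=[0]*m
  let col : List Int := List.replicate n.toNat 0        -- col=[0]*n
  let rc :=
    (PySem.List.pyRange 0 m 1).foldl (fun rc i =>
      (PySem.List.pyRange 0 n 1).foldl (fun rc j =>
        if PySem.List.pyGetD (PySem.List.pyGetD a i []) j 0 = 1 then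
          (PySem.List.pySetD rc.1 i 1, PySem.List.pySetD rc.2 j 1)
        else rc) rc) (row, col)
  (PySem.List.pyRange 0 m 1).foldl (fun acc i =>
    (PySem.List.pyRange 0 n 1).foldl (fun acc j =>
      if PySem.List.pyGetD rc.1 i 0 = 1 ∨ PySem.List.pyGetD rc.2 j 0 = 1 then
        PySem.List.pySetD acc i (PySem.List.pySetD (PySem.List.pyGetD acc i []) j 1)
      else acc) acc) a

-- ===== PORT B =====
def modifyMatrix_alt (m : Int) (n : Int) (a : List (List Int)) : List (List Int) :=
  let RC : PySem.Set Int × PySem.Set Int :=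
    (PySem.List.pyRange 0 m 1).foldl (fun (RC : PySem.Set Int × PySem.Set Int) i =>
      (PySem.List.pyRange 0 n 1).foldl (fun RC j =>
        if PySem.List.pyGetD (PySem.List.pyGetD a i []) j 0 = 1 then
          (PySem.Set.add RC.1 i, PySem.Set.add RC.2 j)
        else RC) RC) (PySem.Set.empty, PySem.Set.empty)
  -- a[i][:n] = [1]*n : slice assignment, ported by hand; exact for 0 ≤ n, which always holds
  -- here since i ∈ rows means the scan found a 1, hence n ≥ 1.
  let a1 := RC.1.foldl (fun acc i =>
    PySem.List.pySetD acc i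
      (List.replicate n.toNat 1 ++ (PySem.List.pyGetD acc i []).drop n.toNat)) a
  RC.2.foldl (fun acc j =>
    (PySem.List.pyRange 0 m 1).foldl (fun acc i =>
      PySem.List.pySetD acc i (PySem.List.pySetD (PySem.List.pyGetD acc i []) j 1)) acc) a1

-- ===== PRECONDITION & SPEC =====
-- Pre_ excludes exactly the inputs on which A raises IndexError: when both loop ranges are
-- nonempty, `a` must have at least m rows and each of the first m rows at least n entries.
def Pre_modifyMatrix (m : Int) (n : Int) (a : List (List Int)) : Prop :=
  0 < m → 0 < n → (m ≤ (a.length : Int) ∧ ∀ r ∈ a.take m.toNat, n ≤ (r.length : Int))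
instance (m : Int) (n : Int) (a : List (List Int)) : Decidable (Pre_modifyMatrix m n a) := by
  unfold Pre_modifyMatrix; infer_instance
def pvWitness_modifyMatrix : Int × Int × List (List Int) := (2, 3, [[0, 1, 0], [0, 0, 0]])

def Spec_modifyMatrix (m : Int) (n : Int) (a : List (List Int)) (out : List (List Int)) : Prop := out = modifyMatrix_alt m n a
instance (m : Int) (n : Int) (a : List (List Int)) (out : List (List Int)) : Decidable (Spec_modifyMatrix m n a out) := by unfold Spec_modifyMatrix; infer_instance

-- ===== CLAIM (what is proved, stated in full; the proofs are below) =====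
def Claim_equal_modifyMatrix : Prop := ∀ (m : Int) (n : Int) (a : List (List Int)), Dom_modifyMatrix m n a → Pre_modifyMatrix m n a → Spec_modifyMatrix m n a (modifyMatrix m n a)

-- ===== LEMMAS AND PROOFS =====

def gRow (mat : List (List Int)) (i : Nat) : List Int := mat.getD i []
def gCell (mat : List (List Int)) (i j : Nat) : Int := (mat.getD i []).getD j 0

-- F arises from mat by writing 1 exactly at the in-bounds cells satisfying w
def MatFacts (mat F : List (List Int)) (w : Nat → Nat → Prop) : Prop :=
  F.length = mat.length ∧
  (∀ i < mat.length, (gRow F i).length = (gRow mat i).length) ∧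
  (∀ i j, i < mat.length → j < (gRow mat i).length →
    (w i j → gCell F i j = 1) ∧ (¬ w i j → gCell F i j = gCell mat i j))

theorem getD_set' {α : Type} (xs : List α) (k : Nat) (v : α) (i : Nat) (d : α) :
    (xs.set k v).getD i d = if k = i ∧ i < xs.length then v else xs.getD i d := by
  simp only [List.getD_eq_getElem?_getD, List.getElem?_set]
  split_ifs with h1 h2 h3 h4 <;> simp_all

theorem matFacts_id (mat : List (List Int)) : MatFacts mat mat (fun _ _ => False) :=
  ⟨rfl, fun _ _ => rfl, fun _ _ _ _ => ⟨fun h => h.elim, fun _ => rfl⟩⟩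

theorem matFacts_congr {mat F : List (List Int)} {w w' : Nat → Nat → Prop}
    (h : MatFacts mat F w)
    (hw : ∀ i j, i < mat.length → j < (gRow mat i).length → (w i j ↔ w' i j)) :
    MatFacts mat F w' := by
  obtain ⟨h1, h2, h3⟩ := h
  refine ⟨h1, h2, fun i j hi hj => ?_⟩
  exact ⟨fun hw' => (h3 i j hi hj).1 ((hw i j hi hj).2 hw'),
    fun hn' => (h3 i j hi hj).2 (fun hw0 => hn' ((hw i j hi hj).1 hw0))⟩

theorem matFacts_comp {mat F G : List (List Int)} {w1 w2 : Nat → Nat → Prop}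
    (h1 : MatFacts mat F w1) (h2 : MatFacts F G w2) :
    MatFacts mat G (fun i j => w1 i j ∨ w2 i j) := by
  obtain ⟨a1, a2, a3⟩ := h1
  obtain ⟨b1, b2, b3⟩ := h2
  refine ⟨b1.trans a1, fun i hi => ?_, fun i j hi hj => ?_⟩
  · rw [b2 i (a1 ▸ hi), a2 i hi]
  · have hjF : j < (gRow F i).length := by rw [a2 i hi]; exact hj
    have hb := b3 i j (a1 ▸ hi) hjF
    have ha := a3 i j hi hj
    constructor
    · rintro (hw1 | hw2)
      · by_cases hw2 : w2 i j
        · exact hb.1 hw2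
        · rw [hb.2 hw2]; exact ha.1 hw1
      · exact hb.1 hw2
    · intro hn
      rw [hb.2 (fun h => hn (Or.inr h)), ha.2 (fun h => hn (Or.inl h))]

theorem matExt (A B : List (List Int)) (hlen : A.length = B.length)
    (hrow : ∀ i < B.length, (gRow A i).length = (gRow B i).length)
    (hcell : ∀ i j, i < B.length → j < (gRow B i).length → gCell A i j = gCell B i j) :
    A = B := by
  apply List.ext_getElem hlen
  intro i h1 h2
  have hri : A[i].length = B[i].length := by
    have := hrow i h2
    simpa [gRow, List.getD_eq_getElem?_getD, List.getElem?_eq_getElem, h1, h2] using this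
  apply List.ext_getElem hri
  intro j hj1 hj2
  have := hcell i j h2 (by
    simpa [gRow, List.getD_eq_getElem?_getD, List.getElem?_eq_getElem, h2] using hj2)
  simpa [gCell, gRow, List.getD_eq_getElem?_getD, List.getElem?_eq_getElem, h1, h2, hj1, hj2]
    using this

theorem matFacts_ext {a FA FB : List (List Int)} {w1 w2 : Nat → Nat → Prop}
    (h1 : MatFacts a FA w1) (h2 : MatFacts a FB w2)
    (hw : ∀ i j, i < a.length → j < (gRow a i).length → (w1 i j ↔ w2 i j)) :
    FA = FB := by
  obtain ⟨a1, a2, a3⟩ := h1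
  obtain ⟨b1, b2, b3⟩ := h2
  refine matExt FA FB (by rw [a1, b1]) (fun i hi => ?_) (fun i j hi hj => ?_)
  · rw [b1] at hi; rw [a2 i hi, b2 i hi]
  · rw [b1] at hi
    have hja : j < (gRow a i).length := by rw [← b2 i hi]; exact hj
    have ha := a3 i j hi hja
    have hb := b3 i j hi hja
    by_cases h : w1 i j
    · rw [ha.1 h, hb.1 ((hw i j hi hja).1 h)]
    · rw [ha.2 h, hb.2 (fun h' => h ((hw i j hi hja).2 h'))]

-- one write a[i][j] = 1 (in the ports: a row read, an element write, a row write back)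
theorem updCell_facts (mat : List (List Int)) (i j : Int) (hi : 0 ≤ i) (hj : 0 ≤ j) :
    MatFacts mat (PySem.List.pySetD mat i (PySem.List.pySetD (PySem.List.pyGetD mat i []) j 1))
      (fun i' j' => i = (i' : Int) ∧ j = (j' : Int)) := by
  rw [PySem.List.pyGetD_of_nonneg mat [] hi,
    PySem.List.pySetD_of_nonneg (mat.getD i.toNat []) 1 hj,
    PySem.List.pySetD_of_nonneg mat _ hi]
  refine ⟨by simp, fun i' hi' => ?_, fun i' j' hi' hj' => ?_⟩
  · simp only [gRow, getD_set']
    split_ifs with h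
    · rw [← h.1]; simp
    · rfl
  · unfold gRow at hj'
    simp only [gCell, getD_set']
    constructor
    · rintro ⟨h1, h2⟩
      have e1 : i.toNat = i' := by omega
      have e2 : j.toNat = j' := by omega
      rw [if_pos ⟨e1, hi'⟩, e1, getD_set', if_pos ⟨e2, hj'⟩]
    · intro hn
      by_cases e1 : i.toNat = i'
      · have hii : i = (i' : Int) := by omega
        have hjj : j ≠ (j' : Int) := fun h => hn ⟨hii, h⟩
        have e2 : j.toNat ≠ j' := by omega
        rw [if_pos ⟨e1, hi'⟩, e1, getD_set', if_neg (fun hc => e2 hc.1)]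
      · rw [if_neg (fun hc => e1 hc.1)]

-- A's inner second-pass loop along one row i
theorem innerA_char (c : Int → Int → Prop) [∀ i j, Decidable (c i j)] (i : Int) (hi : 0 ≤ i) :
    ∀ (Lj : List Int) (mat : List (List Int)), (∀ j ∈ Lj, 0 ≤ j) →
      MatFacts mat
        (Lj.foldl (fun acc j => if c i j then
            PySem.List.pySetD acc i (PySem.List.pySetD (PySem.List.pyGetD acc i []) j 1)
          else acc) mat)
        (fun i' j' => i = (i' : Int) ∧ (j' : Int) ∈ Lj ∧ c i (j' : Int)) := by
  intro Lj
  induction Lj with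
  | nil =>
    intro mat _
    exact matFacts_congr (matFacts_id mat) (by simp)
  | cons j0 Lj ih =>
    intro mat hL
    have hj0 : (0 : Int) ≤ j0 := hL j0 (by simp)
    have hLt : ∀ j ∈ Lj, (0 : Int) ≤ j := fun j hj => hL j (by simp [hj])
    simp only [List.foldl_cons]
    by_cases hc : c i j0
    · rw [if_pos hc]
      refine matFacts_congr (matFacts_comp (updCell_facts mat i j0 hi hj0) (ih _ hLt)) ?_
      intro i' j' _ _
      constructor
      · rintro (⟨h1, h2⟩ | ⟨h1, h2, h3⟩)
        · exact ⟨h1, by simp [← h2], by rwa [← h2]⟩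
        · exact ⟨h1, by simp [h2], h3⟩
      · rintro ⟨h1, h2, h3⟩
        rcases List.mem_cons.1 h2 with h2 | h2
        · exact Or.inl ⟨h1, h2.symm⟩
        · exact Or.inr ⟨h1, h2, h3⟩
    · rw [if_neg hc]
      refine matFacts_congr (ih _ hLt) ?_
      intro i' j' _ _
      constructor
      · rintro ⟨h1, h2, h3⟩; exact ⟨h1, by simp [h2], h3⟩
      · rintro ⟨h1, h2, h3⟩
        rcases List.mem_cons.1 h2 with h2 | h2
        · exact absurd (h2 ▸ h3) hc
        · exact ⟨h1, h2, h3⟩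

-- A's whole second pass
theorem outerA_char (c : Int → Int → Prop) [∀ i j, Decidable (c i j)]
    (Lj : List Int) (hLj : ∀ j ∈ Lj, 0 ≤ j) :
    ∀ (Li : List Int) (mat : List (List Int)), (∀ i ∈ Li, 0 ≤ i) →
      MatFacts mat
        (Li.foldl (fun acc i => Lj.foldl (fun acc j => if c i j then
            PySem.List.pySetD acc i (PySem.List.pySetD (PySem.List.pyGetD acc i []) j 1)
          else acc) acc) mat)
        (fun i' j' => (i' : Int) ∈ Li ∧ (j' : Int) ∈ Lj ∧ c (i' : Int) (j' : Int)) := by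
  intro Li
  induction Li with
  | nil =>
    intro mat _
    exact matFacts_congr (matFacts_id mat) (by simp)
  | cons i0 Li ih =>
    intro mat hL
    have hi0 : (0 : Int) ≤ i0 := hL i0 (by simp)
    have hLt : ∀ i ∈ Li, (0 : Int) ≤ i := fun i hi => hL i (by simp [hi])
    simp only [List.foldl_cons]
    refine matFacts_congr (matFacts_comp (innerA_char c i0 hi0 Lj mat hLj) (ih _ hLt)) ?_
    intro i' j' _ _
    constructor
    · rintro (⟨h1, h2, h3⟩ | ⟨h1, h2, h3⟩)
      · exact ⟨by simp [← h1], h2, by rwa [← h1]⟩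
      · exact ⟨by simp [h1], h2, h3⟩
    · rintro ⟨h1, h2, h3⟩
      rcases List.mem_cons.1 h1 with h1 | h1
      · exact Or.inl ⟨h1.symm, h2, h1 ▸ h3⟩
      · exact Or.inr ⟨h1, h2, h3⟩

-- B: writing 1 down one column j at every row index in L
theorem colFold_char (j : Int) (hj : 0 ≤ j) :
    ∀ (L : List Int) (mat : List (List Int)), (∀ i ∈ L, 0 ≤ i) →
      MatFacts mat
        (L.foldl (fun acc i =>
            PySem.List.pySetD acc i (PySem.List.pySetD (PySem.List.pyGetD acc i []) j 1)) mat)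
        (fun i' j' => (i' : Int) ∈ L ∧ j = (j' : Int)) := by
  intro L
  induction L with
  | nil =>
    intro mat _
    exact matFacts_congr (matFacts_id mat) (by simp)
  | cons i0 L ih =>
    intro mat hL
    have hi0 : (0 : Int) ≤ i0 := hL i0 (by simp)
    have hLt : ∀ i ∈ L, (0 : Int) ≤ i := fun i hi => hL i (by simp [hi])
    simp only [List.foldl_cons]
    refine matFacts_congr (matFacts_comp (updCell_facts mat i0 j hi0 hj) (ih _ hLt)) ?_
    intro i' j' _ _
    constructor
    · rintro (⟨h1, h2⟩ | ⟨h1, h2⟩)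
      · exact ⟨by simp [← h1], h2⟩
      · exact ⟨by simp [h1], h2⟩
    · rintro ⟨h1, h2⟩
      rcases List.mem_cons.1 h1 with h1 | h1
      · exact Or.inl ⟨h1.symm, h2⟩
      · exact Or.inr ⟨h1, h2⟩

-- B's whole column pass
theorem colsFold_char (m : Int) :
    ∀ (C : List Int) (mat : List (List Int)), (∀ j ∈ C, 0 ≤ j) →
      MatFacts mat
        (C.foldl (fun acc j =>
          (PySem.List.pyRange 0 m 1).foldl (fun acc i =>
            PySem.List.pySetD acc i (PySem.List.pySetD (PySem.List.pyGetD acc i []) j 1)) acc) mat)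
        (fun i' j' => (j' : Int) ∈ C ∧ (i' : Int) < m) := by
  intro C
  induction C with
  | nil =>
    intro mat _
    exact matFacts_congr (matFacts_id mat) (by simp)
  | cons j0 C ih =>
    intro mat hC
    have hj0 : (0 : Int) ≤ j0 := hC j0 (by simp)
    have hCt : ∀ j ∈ C, (0 : Int) ≤ j := fun j hj => hC j (by simp [hj])
    simp only [List.foldl_cons]
    have hstep := colFold_char j0 hj0 (PySem.List.pyRange 0 m 1) mat
      (fun i hi => ((PySem.List.mem_pyRange_one).1 hi).1)
    refine matFacts_congr (matFacts_comp hstep (ih _ hCt)) ?_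
    intro i' j' _ _
    simp only [PySem.List.mem_pyRange_one, List.mem_cons]
    constructor
    · rintro (⟨⟨_, h1⟩, h2⟩ | ⟨h1, h2⟩)
      · exact ⟨Or.inl h2.symm, h1⟩
      · exact ⟨Or.inr h1, h2⟩
    · rintro ⟨h1 | h1, h2⟩
      · exact Or.inl ⟨⟨by positivity, h2⟩, h1.symm⟩
      · exact Or.inr ⟨h1, h2⟩

-- B's flagged-row overwrite pass (slice assignment a[i][:n] = [1]*n)
theorem rowsFold_char (n : Int) :
    ∀ (R : List Int) (mat : List (List Int)),
      (∀ i ∈ R, 0 ≤ i ∧ (i.toNat < mat.length → n.toNat ≤ (gRow mat i.toNat).length)) →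
      MatFacts mat
        (R.foldl (fun acc i => PySem.List.pySetD acc i
            (List.replicate n.toNat 1 ++ (PySem.List.pyGetD acc i []).drop n.toNat)) mat)
        (fun i' j' => (i' : Int) ∈ R ∧ (j' : Int) < n) := by
  intro R
  induction R with
  | nil =>
    intro mat _
    exact matFacts_congr (matFacts_id mat) (by simp)
  | cons i0 R ih =>
    intro mat hR
    obtain ⟨hi0, hlen0⟩ := hR i0 (by simp)
    simp only [List.foldl_cons]
    have hstep : MatFacts mat
        (PySem.List.pySetD mat i0
          (List.replicate n.toNat 1 ++ (PySem.List.pyGetD mat i0 []).drop n.toNat))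
        (fun i' j' => i0 = (i' : Int) ∧ (j' : Int) < n) := by
      rw [PySem.List.pyGetD_of_nonneg mat [] hi0, PySem.List.pySetD_of_nonneg mat _ hi0]
      unfold gRow at hlen0
      refine ⟨by simp, fun i' hi' => ?_, fun i' j' hi' hj' => ?_⟩
      · simp only [gRow, getD_set']
        split_ifs with h
        · have hle := hlen0 (h.1 ▸ hi')
          rw [← h.1]
          simp only [List.length_append, List.length_replicate, List.length_drop]
          omega
        · rfl
      · unfold gRow at hj'
        simp only [gCell, getD_set']
        constructor
        · rintro ⟨h1, h2⟩
          have e1 : i0.toNat = i' := by omega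
          have h2' : j' < n.toNat := by omega
          rw [if_pos ⟨e1, hi'⟩, e1, List.getD_eq_getElem?_getD,
            List.getElem?_append_left (by simpa using h2')]
          simp [h2']
        · intro hn
          by_cases e1 : i0.toNat = i'
          · have hii : i0 = (i' : Int) := by omega
            have h2 : ¬ ((j' : Int) < n) := fun h => hn ⟨hii, h⟩
            rw [if_pos ⟨e1, hi'⟩, e1, List.getD_eq_getElem?_getD,
              List.getElem?_append_right (by simp; omega), List.getElem?_drop,
              List.getD_eq_getElem?_getD,
              show n.toNat + (j' - (List.replicate n.toNat (1 : Int)).length) = j' by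
                simp; omega, ← List.getD_eq_getElem?_getD]
          · rw [if_neg (fun hc => e1 hc.1)]
    have hRt : ∀ i ∈ R, 0 ≤ i ∧ (i.toNat < (PySem.List.pySetD mat i0
        (List.replicate n.toNat 1 ++ (PySem.List.pyGetD mat i0 []).drop n.toNat)).length →
        n.toNat ≤ (gRow (PySem.List.pySetD mat i0
          (List.replicate n.toNat 1 ++ (PySem.List.pyGetD mat i0 []).drop n.toNat)) i.toNat).length) := by
      intro i hi
      obtain ⟨h1, h2⟩ := hR i (by simp [hi])
      refine ⟨h1, fun hlt => ?_⟩
      rw [hstep.1] at hlt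
      rw [hstep.2.1 i.toNat hlt]
      exact h2 hlt
    refine matFacts_congr (matFacts_comp hstep (ih _ hRt)) ?_
    intro i' j' _ _
    constructor
    · rintro (⟨h1, h2⟩ | ⟨h1, h2⟩)
      · exact ⟨by simp [← h1], h2⟩
      · exact ⟨by simp [h1], h2⟩
    · rintro ⟨h1, h2⟩
      rcases List.mem_cons.1 h1 with h1 | h1
      · exact Or.inl ⟨h1.symm, h2⟩
      · exact Or.inr ⟨h1, h2⟩

-- coupling invariant between A's 0/1 flag arrays and B's index sets
def ScanInv (m n : Int) (rc : List Int × List Int) (RC : List Int × List Int) : Prop :=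
  rc.1.length = m.toNat ∧ rc.2.length = n.toNat ∧
  (∀ i : Int, 0 ≤ i → (PySem.List.pyGetD rc.1 i 0 = 1 ↔ i ∈ RC.1)) ∧
  (∀ j : Int, 0 ≤ j → (PySem.List.pyGetD rc.2 j 0 = 1 ↔ j ∈ RC.2)) ∧
  (∀ x ∈ RC.1, 0 ≤ x ∧ x < m ∧ 0 < n) ∧
  (∀ x ∈ RC.2, 0 ≤ x ∧ x < n ∧ 0 < m)

theorem addFlag_couple (m n : Int) (i j : Int) (hi : 0 ≤ i ∧ i < m) (hj : 0 ≤ j ∧ j < n)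
    (rc : List Int × List Int) (RC : List Int × List Int) (h : ScanInv m n rc RC) :
    ScanInv m n (PySem.List.pySetD rc.1 i 1, PySem.List.pySetD rc.2 j 1)
      (PySem.Set.add RC.1 i, PySem.Set.add RC.2 j) := by
  obtain ⟨h1, h2, h3, h4, h5, h6⟩ := h
  refine ⟨by simp [h1], by simp [h2], ?_, ?_, ?_, ?_⟩
  · intro x hx
    rw [PySem.List.pySetD_of_nonneg rc.1 1 hi.1, PySem.List.pyGetD_of_nonneg _ 0 hx, getD_set']
    simp only [PySem.Set.mem_add]
    by_cases hxi : x = i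
    · rw [if_pos (by rw [h1]; omega)]
      simp [hxi]
    · rw [if_neg (by omega), ← PySem.List.pyGetD_of_nonneg rc.1 0 hx, h3 x hx]
      simp [hxi]
  · intro x hx
    rw [PySem.List.pySetD_of_nonneg rc.2 1 hj.1, PySem.List.pyGetD_of_nonneg _ 0 hx, getD_set']
    simp only [PySem.Set.mem_add]
    by_cases hxj : x = j
    · rw [if_pos (by rw [h2]; omega)]
      simp [hxj]
    · rw [if_neg (by omega), ← PySem.List.pyGetD_of_nonneg rc.2 0 hx, h4 x hx]
      simp [hxj]
  · intro x hx
    rcases (PySem.Set.mem_add RC.1 i x).1 hx with hx | hx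
    · exact ⟨(h5 x hx).1, (h5 x hx).2.1, by omega⟩
    · exact ⟨hx ▸ hi.1, hx ▸ hi.2, by omega⟩
  · intro x hx
    rcases (PySem.Set.mem_add RC.2 j x).1 hx with hx | hx
    · exact ⟨(h6 x hx).1, (h6 x hx).2.1, by omega⟩
    · exact ⟨hx ▸ hj.1, hx ▸ hj.2, by omega⟩

theorem scanInner_couple (a : List (List Int)) (m n : Int) (i : Int) (hi : 0 ≤ i ∧ i < m) :
    ∀ (Lj : List Int) (rc : List Int × List Int) (RC : List Int × List Int),
      (∀ j ∈ Lj, 0 ≤ j ∧ j < n) → ScanInv m n rc RC →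
      ScanInv m n
        (Lj.foldl (fun rc j => if PySem.List.pyGetD (PySem.List.pyGetD a i []) j 0 = 1 then
            (PySem.List.pySetD rc.1 i 1, PySem.List.pySetD rc.2 j 1) else rc) rc)
        (Lj.foldl (fun RC j => if PySem.List.pyGetD (PySem.List.pyGetD a i []) j 0 = 1 then
            (PySem.Set.add RC.1 i, PySem.Set.add RC.2 j) else RC) RC) := by
  intro Lj
  induction Lj with
  | nil => intro rc RC _ h; exact h
  | cons j0 Lj ih =>
    intro rc RC hL h
    have hj0 := hL j0 (by simp)
    have hLt : ∀ j ∈ Lj, 0 ≤ j ∧ j < n := fun j hj => hL j (by simp [hj])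
    simp only [List.foldl_cons]
    by_cases hc : PySem.List.pyGetD (PySem.List.pyGetD a i []) j0 0 = 1
    · rw [if_pos hc, if_pos hc]
      exact ih _ _ hLt (addFlag_couple m n i j0 hi hj0 rc RC h)
    · rw [if_neg hc, if_neg hc]
      exact ih _ _ hLt h

theorem scan_couple (a : List (List Int)) (m n : Int) :
    ∀ (Li : List Int) (rc : List Int × List Int) (RC : List Int × List Int),
      (∀ i ∈ Li, 0 ≤ i ∧ i < m) → ScanInv m n rc RC →
      ScanInv m n
        (Li.foldl (fun rc i =>
          (PySem.List.pyRange 0 n 1).foldl (fun rc j =>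
            if PySem.List.pyGetD (PySem.List.pyGetD a i []) j 0 = 1 then
              (PySem.List.pySetD rc.1 i 1, PySem.List.pySetD rc.2 j 1) else rc) rc) rc)
        (Li.foldl (fun RC i =>
          (PySem.List.pyRange 0 n 1).foldl (fun RC j =>
            if PySem.List.pyGetD (PySem.List.pyGetD a i []) j 0 = 1 then
              (PySem.Set.add RC.1 i, PySem.Set.add RC.2 j) else RC) RC) RC) := by
  intro Li
  induction Li with
  | nil => intro rc RC _ h; exact h
  | cons i0 Li ih =>
    intro rc RC hL h
    have hi0 := hL i0 (by simp)
    have hLt : ∀ i ∈ Li, 0 ≤ i ∧ i < m := fun i hi => hL i (by simp [hi])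
    simp only [List.foldl_cons]
    refine ih _ _ hLt (scanInner_couple a m n i0 hi0 _ rc RC ?_ h)
    intro j hj
    exact (PySem.List.mem_pyRange_one).1 hj

theorem scanInit (m n : Int) :
    ScanInv m n (List.replicate m.toNat 0, List.replicate n.toNat 0)
      (PySem.Set.empty, PySem.Set.empty) := by
  refine ⟨by simp, by simp, ?_, ?_, by simp [PySem.Set.empty], by simp [PySem.Set.empty]⟩
  · intro i hi
    rw [PySem.List.pyGetD_of_nonneg _ 0 hi]
    simp only [List.getD_eq_getElem?_getD, List.getElem?_replicate]
    split_ifs <;> simp [PySem.Set.empty]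
  · intro j hj
    rw [PySem.List.pyGetD_of_nonneg _ 0 hj]
    simp only [List.getD_eq_getElem?_getD, List.getElem?_replicate]
    split_ifs <;> simp [PySem.Set.empty]

theorem main_aux (m n : Int) (a : List (List Int))
    (pre : 0 < m → 0 < n → (m ≤ (a.length : Int) ∧ ∀ r ∈ a.take m.toNat, n ≤ (r.length : Int)))
    (SA SB : List Int × List Int) (hinv : ScanInv m n SA SB) :
    (PySem.List.pyRange 0 m 1).foldl (fun acc i =>
      (PySem.List.pyRange 0 n 1).foldl (fun acc j =>
        if PySem.List.pyGetD SA.1 i 0 = 1 ∨ PySem.List.pyGetD SA.2 j 0 = 1 then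
          PySem.List.pySetD acc i (PySem.List.pySetD (PySem.List.pyGetD acc i []) j 1)
        else acc) acc) a
    = SB.2.foldl (fun acc j =>
        (PySem.List.pyRange 0 m 1).foldl (fun acc i =>
          PySem.List.pySetD acc i (PySem.List.pySetD (PySem.List.pyGetD acc i []) j 1)) acc)
        (SB.1.foldl (fun acc i =>
          PySem.List.pySetD acc i
            (List.replicate n.toNat 1 ++ (PySem.List.pyGetD acc i []).drop n.toNat)) a) := by
  obtain ⟨lenR, lenC, iffR, iffC, bndR, bndC⟩ := hinv
  have hA := outerA_char
    (fun i j => PySem.List.pyGetD SA.1 i 0 = 1 ∨ PySem.List.pyGetD SA.2 j 0 = 1)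
    (PySem.List.pyRange 0 n 1) (fun j hj => ((PySem.List.mem_pyRange_one).1 hj).1)
    (PySem.List.pyRange 0 m 1) a (fun i hi => ((PySem.List.mem_pyRange_one).1 hi).1)
  have hrows := rowsFold_char n SB.1 a (by
    intro i hi
    obtain ⟨h0, hm, hn⟩ := bndR i hi
    refine ⟨h0, fun hlt => ?_⟩
    obtain ⟨hma, hrl⟩ := pre (by omega) hn
    have hil : i.toNat < a.length := by omega
    have hmem : a[i.toNat] ∈ a.take m.toNat := by
      have : (a.take m.toNat)[i.toNat]'(by simp; omega) = a[i.toNat] := List.getElem_take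
      rw [← this]
      exact List.getElem_mem _
    have := hrl _ hmem
    unfold gRow
    rw [List.getD_eq_getElem?_getD, List.getElem?_eq_getElem hil]
    simp only [Option.getD_some]
    omega)
  have hcols := colsFold_char m SB.2
    (SB.1.foldl (fun acc i => PySem.List.pySetD acc i
      (List.replicate n.toNat 1 ++ (PySem.List.pyGetD acc i []).drop n.toNat)) a)
    (fun j hj => (bndC j hj).1)
  refine matFacts_ext hA (matFacts_comp hrows hcols) ?_
  intro i' j' hi' hj'
  have hi0 : (0 : Int) ≤ (i' : Int) := Int.natCast_nonneg i'
  have hj0 : (0 : Int) ≤ (j' : Int) := Int.natCast_nonneg j'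
  simp only [PySem.List.mem_pyRange_one]
  constructor
  · rintro ⟨⟨_, h1⟩, ⟨_, h2⟩, h3 | h3⟩
    · exact Or.inl ⟨(iffR _ hi0).1 h3, h2⟩
    · exact Or.inr ⟨(iffC _ hj0).1 h3, h1⟩
  · rintro (⟨h1, h2⟩ | ⟨h1, h2⟩)
    · have hb := bndR _ h1
      exact ⟨⟨hi0, hb.2.1⟩, ⟨hj0, h2⟩, Or.inl ((iffR _ hi0).2 h1)⟩
    · have hb := bndC _ h1
      exact ⟨⟨hi0, h2⟩, ⟨hj0, hb.2.1⟩, Or.inr ((iffC _ hj0).2 h1)⟩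

-- ===== VERDICT (by name: the statement is the Claim_ definition above) =====
theorem modifyMatrix_spec : Claim_equal_modifyMatrix := by
  intro m n a _dom pre
  unfold Pre_modifyMatrix at pre
  unfold Spec_modifyMatrix modifyMatrix modifyMatrix_alt
  exact main_aux m n a pre _ _
    (scan_couple a m n (PySem.List.pyRange 0 m 1) _ _
      (fun i hi => ⟨((PySem.List.mem_pyRange_one).1 hi).1, ((PySem.List.mem_pyRange_one).1 hi).2⟩)
      (scanInit m n))
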